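-- pv_equiv track=rewrite | github.com/Cyrof/Email-ML | preprocessing/label.py | check_kw_count
-- ===== SOURCE A (Python) =====
-- def check_kw_count(kw, word_count):
--     """ function to check word in keyword and total count of word appearance
--     :param kw: dict of keywords
--     :param word_count: count of all word appearance
--     :return kw_count: return words from keyword ans total count of appearance
--     """
--     kw_count = {key: 0 for key in kw}
--
--     for key in word_count:
--         for kw_key, val_list in kw.items():
--             if key in val_list:
--                 kw_count[kw_key] += word_count[key]
--             else:
--                 continue
--     return kw_count
-- ===== SOURCE B (Python) =====
-- def check_kw_count(kw, word_count):
--     """Inverted index word -> categories, then one pass over word_count."""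
--     inv = {}
--     for cat, words in kw.items():
--         for w in dict.fromkeys(words):
--             inv.setdefault(w, []).append(cat)
--     kw_count = {cat: 0 for cat in kw}
--     for w, c in word_count.items():
--         for cat in inv.get(w, ()):
--             kw_count[cat] += c
--     return kw_count
-- ===== Notes on version B (the rewrite author's own statement) =====
-- stated objective: faster
-- what changed: Replaces the nested scan (every word_count key against every keyword list) by a precomputed inverted index word->categories, so each counted word is handled by one dict lookup.
import Mathlib
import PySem

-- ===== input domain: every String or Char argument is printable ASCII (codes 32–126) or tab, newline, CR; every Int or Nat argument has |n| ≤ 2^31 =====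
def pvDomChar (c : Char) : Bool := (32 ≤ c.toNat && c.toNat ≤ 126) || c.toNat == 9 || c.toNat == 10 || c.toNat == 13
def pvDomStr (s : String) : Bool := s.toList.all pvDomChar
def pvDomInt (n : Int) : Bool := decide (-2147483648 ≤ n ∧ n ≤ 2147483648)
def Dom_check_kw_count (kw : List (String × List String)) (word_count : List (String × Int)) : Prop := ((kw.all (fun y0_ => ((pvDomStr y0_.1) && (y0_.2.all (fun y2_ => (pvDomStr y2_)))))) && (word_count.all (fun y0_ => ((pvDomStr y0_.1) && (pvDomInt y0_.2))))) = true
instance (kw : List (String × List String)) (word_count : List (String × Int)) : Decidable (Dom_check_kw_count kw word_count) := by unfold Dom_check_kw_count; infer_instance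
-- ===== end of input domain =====

-- B replaces A's nested scan (every counted word against every keyword list) by a
-- precomputed inverted index word -> categories and a single indexed pass over word_count.
-- Equivalence of the returned dict (as an insertion-ordered item list) is proved below.

-- ===== PORT A =====
-- A: kw_count = {key: 0 for key in kw}; for key in word_count: for kw_key, val_list in kw.items():
--    if key in val_list: kw_count[kw_key] += word_count[key]
def check_kw_count (kw : List (String × List String)) (word_count : List (String × Int)) : List (String × Int) :=
  let kwD := PySem.Dict.ofList kw
  let wcD := PySem.Dict.ofList word_count
  let kw_count0 := kwD.keys.foldl (fun d key => d.insert key (0 : Int)) PySem.Dict.empty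
  let final := wcD.keys.foldl (fun d key =>
      kwD.items.foldl (fun d p =>
        if p.2.contains key then d.modify p.1 0 (· + wcD.getD key 0) else d) d) kw_count0
  final.items

-- ===== PORT B =====
-- B: inv = {}; for cat, words in kw.items(): for w in dict.fromkeys(words): inv.setdefault(w, []).append(cat)
--    kw_count = {cat: 0 for cat in kw}; for w, c in word_count.items(): for cat in inv.get(w, ()): kw_count[cat] += c
def check_kw_count_alt (kw : List (String × List String)) (word_count : List (String × Int)) : List (String × Int) :=
  let kwD := PySem.Dict.ofList kw
  let wcD := PySem.Dict.ofList word_count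
  let inv : PySem.Dict String (List String) :=
    kwD.items.foldl (fun d p =>
      (PySem.List.dedup p.2).foldl (fun d w => d.modify w [] (· ++ [p.1])) d) PySem.Dict.empty
  let kw_count0 := kwD.keys.foldl (fun d cat => d.insert cat (0 : Int)) PySem.Dict.empty
  let final := wcD.items.foldl (fun d q =>
      (inv.getD q.1 []).foldl (fun d cat => d.modify cat 0 (· + q.2)) d) kw_count0
  final.items

-- ===== PRECONDITION & SPEC =====
def Spec_check_kw_count (kw : List (String × List String)) (word_count : List (String × Int)) (out : List (String × Int)) : Prop := out = check_kw_count_alt kw word_count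
instance (kw : List (String × List String)) (word_count : List (String × Int)) (out : List (String × Int)) : Decidable (Spec_check_kw_count kw word_count out) := by unfold Spec_check_kw_count; infer_instance

-- ===== CLAIM (what is proved, stated in full; the proofs are below) =====
def Claim_equal_check_kw_count : Prop := ∀ (kw : List (String × List String)) (word_count : List (String × Int)), Dom_check_kw_count kw word_count → Spec_check_kw_count kw word_count (check_kw_count kw word_count)

-- ===== LEMMAS AND PROOFS =====

-- keys are unchanged by a modify at a key already present
theorem keys_modify_of_contains {κ ν : Type} [BEq κ] [LawfulBEq κ] (d : PySem.Dict κ ν)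
    {k : κ} (d0 : ν) (f : ν → ν) (h : d.contains k = true) :
    (d.modify k d0 f).keys = d.keys := by
  rw [PySem.Dict.keys_modify, PySem.Dict.keys_insert_of_contains _ _ h]

-- ---- A's inner loop over kw.items ----
theorem A_inner_getD (l : List (String × List String)) (key : String) (v : Int)
    (d : PySem.Dict String Int) (c : String) :
    (l.foldl (fun d p => if p.2.contains key then d.modify p.1 0 (· + v) else d) d).getD c 0
      = d.getD c 0 + (l.countP (fun p => p.1 == c && p.2.contains key) : Int) * v := by
  induction l generalizing d with
  | nil => simp
  | cons p l ih =>
    simp only [List.foldl_cons, List.countP_cons, ih]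
    by_cases hk : p.2.contains key = true
    · simp only [hk, if_pos]
      rw [PySem.Dict.getD_modify]
      by_cases hc : c = p.1
      · subst hc; simp; ring
      · have : (p.1 == c) = false := by simp [Ne.symm hc]
        simp [hc, this]
    · simp only [Bool.not_eq_true] at hk
      have hk' : key ∉ p.2 := by simpa using hk
      simp [hk']

theorem A_inner_keys (l : List (String × List String)) (key : String) (v : Int)
    (d : PySem.Dict String Int) (h : ∀ p ∈ l, p.1 ∈ d.keys) :
    (l.foldl (fun d p => if p.2.contains key then d.modify p.1 0 (· + v) else d) d).keys = d.keys := by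
  induction l generalizing d with
  | nil => rfl
  | cons p l ih =>
    have hp : p.1 ∈ d.keys := h p (by simp)
    by_cases hk : p.2.contains key = true
    · have hkeys : (d.modify p.1 0 (· + v)).keys = d.keys :=
        keys_modify_of_contains _ _ _ ((PySem.Dict.contains_iff_mem_keys d p.1).mpr hp)
      simp only [List.foldl_cons, hk, if_pos]
      rw [ih _ (fun q hq => by rw [hkeys]; exact h q (List.mem_cons_of_mem _ hq)), hkeys]
    · simp only [Bool.not_eq_true] at hk
      simp only [List.foldl_cons, hk]
      simp only [Bool.false_eq_true, if_false]
      exact ih _ (fun q hq => h q (List.mem_cons_of_mem _ hq))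

-- ---- A's outer loop over word_count keys ----
theorem A_outer_getD (ks : List String) (kwI : List (String × List String))
    (wcD : PySem.Dict String Int) (d : PySem.Dict String Int) (c : String) :
    (ks.foldl (fun d key =>
        kwI.foldl (fun d p => if p.2.contains key then d.modify p.1 0 (· + wcD.getD key 0) else d) d) d).getD c 0
      = d.getD c 0 + (ks.map (fun key =>
          (kwI.countP (fun p => p.1 == c && p.2.contains key) : Int) * wcD.getD key 0)).sum := by
  induction ks generalizing d with
  | nil => simp
  | cons k ks ih =>
    simp only [List.foldl_cons, List.map_cons, List.sum_cons, ih, A_inner_getD]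
    ring

theorem A_outer_keys (ks : List String) (kwI : List (String × List String))
    (wcD : PySem.Dict String Int) (d : PySem.Dict String Int) (h : ∀ p ∈ kwI, p.1 ∈ d.keys) :
    (ks.foldl (fun d key =>
        kwI.foldl (fun d p => if p.2.contains key then d.modify p.1 0 (· + wcD.getD key 0) else d) d) d).keys = d.keys := by
  induction ks generalizing d with
  | nil => rfl
  | cons k ks ih =>
    simp only [List.foldl_cons]
    have hk := A_inner_keys kwI k (wcD.getD k 0) d h
    rw [ih _ (fun q hq => by rw [hk]; exact h q hq), hk]

-- ---- inverted index characterisation ----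
theorem inv_inner_getD (l : List String) (c : String) (d : PySem.Dict String (List String)) (w : String) :
    (l.foldl (fun d x => d.modify x [] (· ++ [c])) d).getD w []
      = d.getD w [] ++ List.replicate (l.count w) c := by
  induction l generalizing d with
  | nil => simp
  | cons x l ih =>
    simp only [List.foldl_cons, ih, List.count_cons, PySem.Dict.getD_modify]
    by_cases hw : w = x
    · subst hw
      simp
      rw [← List.replicate_succ, List.replicate_succ']
    · have : (x == w) = false := by simp [Ne.symm hw]
      simp [hw, this]

theorem inv_getD (l : List (String × List String)) (d : PySem.Dict String (List String)) (w : String) :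
    (l.foldl (fun d p => (PySem.List.dedup p.2).foldl (fun d x => d.modify x [] (· ++ [p.1])) d) d).getD w []
      = d.getD w [] ++ (l.filter (fun p => p.2.contains w)).map (·.1) := by
  induction l generalizing d with
  | nil => simp
  | cons p l ih =>
    simp only [List.foldl_cons, ih, inv_inner_getD, List.filter_cons]
    by_cases hw : w ∈ p.2
    · simp [hw]
    · have h0 : List.count w (PySem.Set.ofList p.2) = 0 :=
        List.count_eq_zero.mpr (fun hm => hw ((PySem.Set.mem_ofList p.2 w).mp hm))
      simp [hw, h0]

-- ---- B's final loop ----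
theorem B_inner_getD (l : List String) (v : Int) (d : PySem.Dict String Int) (c : String) :
    (l.foldl (fun d cat => d.modify cat 0 (· + v)) d).getD c 0
      = d.getD c 0 + (l.count c : Int) * v := by
  induction l generalizing d with
  | nil => simp
  | cons x l ih =>
    simp only [List.foldl_cons, ih, List.count_cons, PySem.Dict.getD_modify]
    by_cases hc : c = x
    · subst hc; simp; ring
    · have : (x == c) = false := by simp [Ne.symm hc]
      simp [hc, this]

theorem B_inner_keys (l : List String) (v : Int) (d : PySem.Dict String Int)
    (h : ∀ x ∈ l, x ∈ d.keys) :
    (l.foldl (fun d cat => d.modify cat 0 (· + v)) d).keys = d.keys := by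
  induction l generalizing d with
  | nil => rfl
  | cons x l ih =>
    have hkeys : (d.modify x 0 (· + v)).keys = d.keys :=
      keys_modify_of_contains _ _ _ ((PySem.Dict.contains_iff_mem_keys d x).mpr (h x (by simp)))
    simp only [List.foldl_cons]
    rw [ih _ (fun y hy => by rw [hkeys]; exact h y (List.mem_cons_of_mem _ hy)), hkeys]

theorem B_outer_getD (L : List (String × Int)) (inv : PySem.Dict String (List String))
    (d : PySem.Dict String Int) (c : String) :
    (L.foldl (fun d q => (inv.getD q.1 []).foldl (fun d cat => d.modify cat 0 (· + q.2)) d) d).getD c 0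
      = d.getD c 0 + (L.map (fun q => ((inv.getD q.1 []).count c : Int) * q.2)).sum := by
  induction L generalizing d with
  | nil => simp
  | cons q L ih =>
    simp only [List.foldl_cons, List.map_cons, List.sum_cons, ih, B_inner_getD]
    ring

theorem B_outer_keys (L : List (String × Int)) (inv : PySem.Dict String (List String))
    (d : PySem.Dict String Int) (h : ∀ q ∈ L, ∀ c ∈ inv.getD q.1 [], c ∈ d.keys) :
    (L.foldl (fun d q => (inv.getD q.1 []).foldl (fun d cat => d.modify cat 0 (· + q.2)) d) d).keys = d.keys := by
  induction L generalizing d with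
  | nil => rfl
  | cons q L ih =>
    simp only [List.foldl_cons]
    have hk := B_inner_keys (inv.getD q.1 []) q.2 d (h q (by simp))
    rw [ih _ (fun r hr c hc => by rw [hk]; exact h r (List.mem_cons_of_mem _ hr) c hc), hk]

-- the zero-initialised dict {key: 0 for key in kw}: its keys
theorem set_update_append (ks : List String) (s : PySem.Set String)
    (hnd : ks.Nodup) (hdis : ∀ k ∈ ks, k ∉ s) :
    PySem.Set.update s ks = s ++ ks := by
  induction ks generalizing s with
  | nil => simp [PySem.Set.update_nil]
  | cons k ks ih =>
    simp only [List.nodup_cons] at hnd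
    have hadd : PySem.Set.add s k = s ++ [k] :=
      PySem.Set.add_of_not_mem (hdis k (by simp))
    have : PySem.Set.update s (k :: ks) = PySem.Set.update (PySem.Set.add s k) ks := rfl
    rw [this, hadd, ih _ hnd.2]
    · simp
    · intro x hx
      simp only [List.mem_append, List.mem_singleton]
      rintro (h | h)
      · exact hdis x (List.mem_cons_of_mem _ hx) h
      · exact hnd.1 (h ▸ hx)

theorem zero_dict_keys (ks : List String) (h : ks.Nodup) :
    (ks.foldl (fun d key => d.insert key (0 : Int)) PySem.Dict.empty).keys = ks := by
  rw [PySem.Dict.keys_foldl_insert]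
  have : (PySem.Dict.empty : PySem.Dict String Int).keys = [] := rfl
  rw [this, set_update_append ks [] h (by simp)]
  rfl

-- ===== VERDICT (by name: the statement is the Claim_ definition above) =====
theorem check_kw_count_spec : Claim_equal_check_kw_count := by
  intro kw wc _
  unfold Spec_check_kw_count check_kw_count check_kw_count_alt
  simp only []
  set kwD := PySem.Dict.ofList kw with hkwD
  set wcD := PySem.Dict.ofList wc with hwcD
  set kw_count0 := kwD.keys.foldl (fun d key => d.insert key (0 : Int)) PySem.Dict.empty with hkc0
  set inv : PySem.Dict String (List String) :=
    kwD.items.foldl (fun d p =>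
      (PySem.List.dedup p.2).foldl (fun d w => d.modify w [] (· ++ [p.1])) d) PySem.Dict.empty with hinv
  have nd0 : kwD.keys.Nodup := PySem.Dict.nodup_keys_ofList kw
  have keys0 : kw_count0.keys = kwD.keys := zero_dict_keys kwD.keys nd0
  have hinvD : ∀ w, inv.getD w [] = (kwD.items.filter (fun p => p.2.contains w)).map (·.1) := by
    intro w
    rw [hinv, inv_getD]
    simp [PySem.Dict.getD_empty]
  have hmemkeys : ∀ p ∈ kwD.items, p.1 ∈ kw_count0.keys := by
    intro p hp
    rw [keys0]
    exact List.mem_map_of_mem hp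
  have hkeysA := A_outer_keys wcD.keys kwD.items wcD kw_count0 hmemkeys
  have hkeysB := B_outer_keys wcD.items inv kw_count0 (by
    intro q _ c hc
    rw [hinvD q.1] at hc
    rw [keys0]
    obtain ⟨p, hp, hpe⟩ := List.mem_map.mp hc
    exact hpe ▸ List.mem_map_of_mem (List.mem_of_mem_filter hp))
  have ndA : (wcD.keys.foldl (fun d key =>
      kwD.items.foldl (fun d p => if p.2.contains key then d.modify p.1 0 (· + wcD.getD key 0) else d) d) kw_count0).keys.Nodup := by
    rw [hkeysA, keys0]; exact nd0
  have ndB : (wcD.items.foldl (fun d q =>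
      (inv.getD q.1 []).foldl (fun d cat => d.modify cat 0 (· + q.2)) d) kw_count0).keys.Nodup := by
    rw [hkeysB, keys0]; exact nd0
  rw [PySem.Dict.items_eq_map_keys _ ndA 0, PySem.Dict.items_eq_map_keys _ ndB 0, hkeysA, hkeysB]
  refine List.map_congr_left (fun c _ => ?_)
  have key_eq : ∀ q ∈ wcD.items,
      ((kwD.items.countP (fun p => p.1 == c && p.2.contains q.1) : Int)) * wcD.getD q.1 0
        = ((List.count c (inv.getD q.1 []) : Int)) * q.2 := by
    intro q hq
    have hv : wcD.getD q.1 0 = q.2 :=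
      PySem.Dict.getD_of_mem_items wcD (by exact hq) (PySem.Dict.nodup_keys_ofList wc) 0
    rw [hv, hinvD q.1]
    congr 2
    rw [List.count_eq_countP, List.countP_map, List.countP_filter]
    rfl
  rw [A_outer_getD, B_outer_getD, show wcD.keys = wcD.items.map (·.1) from rfl, List.map_map]
  have hmaps : List.map ((fun key =>
        ((kwD.items.countP (fun p => p.1 == c && p.2.contains key) : Int)) * wcD.getD key 0) ∘ (·.1)) wcD.items
      = List.map (fun q => ((List.count c (inv.getD q.1 []) : Int)) * q.2) wcD.items :=
    List.map_congr_left (fun q hq => key_eq q hq)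
  rw [hmaps]
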